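-- pv_equiv track=rewrite | github.com/usrofgh/pylearning | mornings/tv_remove.py | tv_remote
-- ===== SOURCE A (Python) =====
-- def tv_remote(word: str) -> int:
--     keyboard = [
--         "abcde123",
--         "fghij456",
--         "klmno789",
--         "pqrst.@0",
--         "uvwxyz_/",
--     ]
--     cur_pos = (0, 0)
--     total_presses = 0
--     for letter in word:
--         letter_pos = None
--         for i, row in enumerate(keyboard):
--             if letter in row:
--                 letter_pos = (i, row.index(letter))
--                 break
--         if letter_pos is None:
--             raise ValueError("Invalid character: " + letter)
--         row_dist = abs(cur_pos[0] - letter_pos[0])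
--         col_dist = abs(cur_pos[1] - letter_pos[1])
--         total_presses += row_dist + col_dist + 1
--         cur_pos = letter_pos
--     return total_presses
-- ===== SOURCE B (Python) =====
-- _KEYBOARD = [
--     "abcde123",
--     "fghij456",
--     "klmno789",
--     "pqrst.@0",
--     "uvwxyz_/",
-- ]
-- _FLAT = "".join(_KEYBOARD)
--
--
-- def tv_remote(word: str) -> int:
--     r = c = 0
--     presses = 0
--     for ch in word:
--         i = _FLAT.find(ch)
--         if i < 0:
--             raise ValueError("Invalid character: " + ch)
--         tr, tc = divmod(i, 8)
--         # simulate the remote: one key press per unit move, then OK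
--         while r < tr:
--             r += 1
--             presses += 1
--         while r > tr:
--             r -= 1
--             presses += 1
--         while c < tc:
--             c += 1
--             presses += 1
--         while c > tc:
--             c -= 1
--             presses += 1
--         presses += 1
--     return presses
-- ===== Notes on version B (the rewrite author's own statement) =====
-- stated objective: alternative
-- what changed: Replaces the per-letter row scan and Manhattan-distance arithmetic with a single flat-string find plus divmod for the key position and a unit-step cursor simulation (while loops pressing one arrow key at a time) instead of abs-based distance sums.
import Mathlib
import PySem

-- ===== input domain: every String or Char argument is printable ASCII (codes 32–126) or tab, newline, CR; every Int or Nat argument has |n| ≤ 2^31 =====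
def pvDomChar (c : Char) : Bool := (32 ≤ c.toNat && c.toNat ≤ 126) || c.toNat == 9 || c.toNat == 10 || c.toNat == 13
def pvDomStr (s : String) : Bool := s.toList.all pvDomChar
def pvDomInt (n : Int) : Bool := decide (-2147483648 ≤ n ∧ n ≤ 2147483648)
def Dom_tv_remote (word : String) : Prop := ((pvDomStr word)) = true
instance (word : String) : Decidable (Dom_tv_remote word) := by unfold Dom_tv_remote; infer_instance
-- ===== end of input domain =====

-- B looks keys up by flat-string find + divmod and simulates the cursor with unit-step
-- while loops instead of A's row scan and abs-distance arithmetic (objective: alternative).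


-- ===== PORT A =====
def tvKeyboard : List String :=
  ["abcde123", "fghij456", "klmno789", "pqrst.@0", "uvwxyz_/"]

-- the inner 'for i, row in enumerate(keyboard): if letter in row: …; break' scan
def tvFindLoop (letter : Char) : List (Int × String) → Option (Int × Int)
  | [] => none
  | (i, row) :: rest =>
    if letter ∈ row.toList then
      match PySem.List.index? row.toList letter with
      | some j => some (i, (j : Int))
      | none => none   -- unreachable: guarded by the membership test
    else tvFindLoop letter rest

-- the main loop threading (cur_pos, total_presses); 'none' = the ValueError path
def tvLoopA : List Char → (Int × Int) → Int → Option Int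
  | [], _, total => some total
  | c :: rest, cur, total =>
    match tvFindLoop c (PySem.List.enumerate tvKeyboard) with
    | none => none
    | some p => tvLoopA rest p (total + (|cur.1 - p.1| + |cur.2 - p.2| + 1))

def tv_remote (word : String) : Int :=
  (tvLoopA word.toList (0, 0) 0).getD 0

-- ===== PORT B =====
-- _FLAT = "".join(_KEYBOARD)
def tvFlat : String := PySem.Str.join "" tvKeyboard

-- 'while x < t: x += 1; presses += 1' — returns (x, presses); the Nat fuel is the exact
-- number of iterations left, so each unit step of the Python loop is one recursive call
def tvWhileLtAux : Nat → Int → Int → Int × Int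
  | 0, x, p => (x, p)
  | n + 1, x, p => tvWhileLtAux n (x + 1) (p + 1)
def tvWhileLt (x t p : Int) : Int × Int := tvWhileLtAux (t - x).toNat x p

-- 'while x > t: x -= 1; presses += 1'
def tvWhileGtAux : Nat → Int → Int → Int × Int
  | 0, x, p => (x, p)
  | n + 1, x, p => tvWhileGtAux n (x - 1) (p + 1)
def tvWhileGt (x t p : Int) : Int × Int := tvWhileGtAux (x - t).toNat x p

-- the main loop threading (r, c, presses); 'none' = the ValueError path
def tvLoopB : List Char → Int → Int → Int → Option Int
  | [], _, _, p => some p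
  | ch :: rest, r, c, p =>
    let i := PySem.Str.find tvFlat (String.ofList [ch])
    if i < 0 then none
    else
      let tr := PySem.Int.floordiv i 8
      let tc := PySem.Int.mod i 8
      let rp := tvWhileLt r tr p
      let rp := tvWhileGt rp.1 tr rp.2
      let cp := tvWhileLt c tc rp.2
      let cp := tvWhileGt cp.1 tc cp.2
      tvLoopB rest rp.1 cp.1 (cp.2 + 1)

def tv_remote_alt (word : String) : Int :=
  (tvLoopB word.toList 0 0 0).getD 0

-- ===== PRECONDITION & SPEC =====
-- the 40 characters of the keyboard grid
def tvAlpha : List Char :=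
  ['a', 'b', 'c', 'd', 'e', '1', '2', '3', 'f', 'g', 'h', 'i', 'j', '4', '5', '6', 'k', 'l', 'm', 'n', 'o', '7', '8', '9', 'p', 'q', 'r', 's', 't', '.', '@', '0', 'u', 'v', 'w', 'x', 'y', 'z', '_', '/']

-- Pre_ excludes exactly the words containing a character absent from the grid, on which A raises ValueError
def Pre_tv_remote (word : String) : Prop := word.toList.all (fun c => tvAlpha.contains c) = true
instance (word : String) : Decidable (Pre_tv_remote word) := by unfold Pre_tv_remote; infer_instance
def pvWitness_tv_remote : String := "abc"

def Spec_tv_remote (word : String) (out : Int) : Prop := out = tv_remote_alt word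
instance (word : String) (out : Int) : Decidable (Spec_tv_remote word out) := by unfold Spec_tv_remote; infer_instance

-- ===== CLAIM =====
def Claim_equal_tv_remote : Prop := ∀ (word : String), Dom_tv_remote word → Pre_tv_remote word → Spec_tv_remote word (tv_remote word)

-- ===== LEMMAS AND PROOFS =====

set_option maxRecDepth 4000

-- the position both lookups agree on, used only by the proofs
def tvF (ch : Char) : Int × Int := (tvFindLoop ch (PySem.List.enumerate tvKeyboard)).getD (0, 0)

lemma tvA_char (ch : Char) (h : ch ∈ tvAlpha) :
    tvFindLoop ch (PySem.List.enumerate tvKeyboard) = some (tvF ch) := by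
  fin_cases h <;> decide

lemma tvB_char (ch : Char) (h : ch ∈ tvAlpha) :
    PySem.Str.find tvFlat (String.ofList [ch]) = (tvF ch).1 * 8 + (tvF ch).2 ∧
    0 ≤ (tvF ch).1 ∧ 0 ≤ (tvF ch).2 ∧ (tvF ch).2 < 8 := by
  fin_cases h <;> decide

lemma tvWhileLtAux_spec (n : Nat) (x p : Int) :
    tvWhileLtAux n x p = (x + n, p + n) := by
  induction n generalizing x p with
  | zero => simp [tvWhileLtAux]
  | succ n ih => simp [tvWhileLtAux, ih]; constructor <;> ring

lemma tvWhileGtAux_spec (n : Nat) (x p : Int) :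
    tvWhileGtAux n x p = (x - n, p + n) := by
  induction n generalizing x p with
  | zero => simp [tvWhileGtAux]
  | succ n ih => simp [tvWhileGtAux, ih]; constructor <;> ring

lemma tvWhileLt_spec (x t p : Int) :
    tvWhileLt x t p = (max x t, p + max 0 (t - x)) := by
  unfold tvWhileLt
  rw [tvWhileLtAux_spec]
  apply Prod.ext <;> simp <;> omega

lemma tvWhileGt_spec (x t p : Int) :
    tvWhileGt x t p = (min x t, p + max 0 (x - t)) := by
  unfold tvWhileGt
  rw [tvWhileGtAux_spec]
  apply Prod.ext <;> simp <;> omega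

lemma tvLoop_eq (cs : List Char) (r c acc : Int) (h : ∀ x ∈ cs, x ∈ tvAlpha) :
    tvLoopB cs r c acc = tvLoopA cs (r, c) acc := by
  induction cs generalizing r c acc with
  | nil => rfl
  | cons ch cs ih =>
    have hmem : ch ∈ tvAlpha := h ch (by simp)
    obtain ⟨hfind, h1, h2, h3⟩ := tvB_char ch hmem
    simp only [tvLoopA, tvLoopB, tvA_char ch hmem, hfind]
    have hdiv : PySem.Int.floordiv ((tvF ch).1 * 8 + (tvF ch).2) 8 = (tvF ch).1 := by
      rw [PySem.Int.floordiv_eq_iff_of_pos (by norm_num)]; omega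
    have hmod : PySem.Int.mod ((tvF ch).1 * 8 + (tvF ch).2) 8 = (tvF ch).2 := by
      have := PySem.Int.floordiv_mul_add_mod ((tvF ch).1 * 8 + (tvF ch).2) 8
      rw [hdiv] at this; omega
    rw [if_neg (by omega)]
    simp only [hdiv, hmod, tvWhileLt_spec, tvWhileGt_spec]
    rw [ih _ _ _ (fun x hx => h x (by simp [hx]))]
    congr 1
    · apply Prod.ext <;> simp
    · simp only [abs_eq_max_neg]
      omega

-- ===== VERDICT =====
theorem tv_remote_spec : Claim_equal_tv_remote := by
  intro word _ hpre
  unfold Pre_tv_remote at hpre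
  rw [List.all_eq_true] at hpre
  unfold Spec_tv_remote tv_remote tv_remote_alt
  rw [tvLoop_eq _ _ _ _ (fun x hx => by simpa using hpre x hx)]
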